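-- pv_equiv track=rewrite | github.com/IFT3275-Securite-Informatique/ift3275-securite-informatique-classroom-1994d2-devoir-1-cryptographie-devoir1-ift3275 | crypt.py | chiffrer2
-- ===== SOURCE A (Python) =====
-- def chiffrer2(M, K) -> str:
--     """
--     Encode le texte en utilisant un dictionnaire personnalisé.
--
--     :param text: Le texte à encoder
--     :param custom_dict: Le dictionnaire de correspondances
--     :return: Le texte encodé
--     """
--     encoded_text = []
--     i = 0
--
--     while i < len(M):
--         # Vérifie les paires de caractères
--         if i + 1 < len(M):
--             pair = M[i] + M[i + 1]
--             if pair in K: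
--                 encoded_text.append(K[pair])
--                 i += 2  # Sauter les deux caractères utilisés
--                 continue
--
--         # Vérifie le caractère seul
--         if M[i] in K:
--             encoded_text.append(K[M[i]])
--         else:
--             # Conserve le caractère tel quel si non trouvé
--             encoded_text.append(M[i])
--         i += 1
--
--     return ''.join(encoded_text)
-- ===== SOURCE B (Python) =====
-- def chiffrer2(M, K) -> str:
--     # Pass 1: a decision table over ALL indices: tbl[i] = (piece emitted at i, jump width),
--     # computed independently per index from the greedy rule (pair key wins over single char).
--     n = len(M)
--     tbl = []
--     for i in range(n):
--         p = M[i:i+2]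
--         if len(p) == 2 and p in K:
--             tbl.append((K[p], 2))
--         else:
--             tbl.append((K.get(M[i], M[i]), 1))
--     # Pass 2: pointer-jump through the table from index 0, collecting pieces.
--     out = []
--     i = 0
--     while i < n:
--         piece, step = tbl[i]
--         out.append(piece)
--         i += step
--     return ''.join(out)
-- ===== Notes on version B (the rewrite author's own statement) =====
-- stated objective: alternative
-- what changed: A's interleaved match-and-substitute scan is replaced by a full per-index decision table (piece, jump) computed for every position, followed by a pointer-jumping pass that follows the jump chain from 0 and joins the pieces.
import Mathlib
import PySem

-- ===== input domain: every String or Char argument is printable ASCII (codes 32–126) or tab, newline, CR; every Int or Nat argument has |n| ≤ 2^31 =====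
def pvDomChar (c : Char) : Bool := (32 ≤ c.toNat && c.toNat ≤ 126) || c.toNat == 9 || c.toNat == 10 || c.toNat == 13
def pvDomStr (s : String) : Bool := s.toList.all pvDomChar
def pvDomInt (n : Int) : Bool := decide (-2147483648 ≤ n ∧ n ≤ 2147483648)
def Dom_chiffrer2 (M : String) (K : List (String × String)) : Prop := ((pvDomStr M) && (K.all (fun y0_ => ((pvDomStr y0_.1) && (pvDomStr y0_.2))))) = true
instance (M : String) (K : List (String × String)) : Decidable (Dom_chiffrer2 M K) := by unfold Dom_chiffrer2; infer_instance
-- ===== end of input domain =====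

-- B replaces A's interleaved match-and-substitute scan by a full per-index decision table plus a pointer-jumping pass (objective: alternative).


-- ===== PORT A =====
-- first-match association-list lookup: Python's 'k in K' / 'K[k]' / 'K.get(k, d)' on the dict K
def pvLookup (K : List (String × String)) (k : String) : Option String :=
  (K.find? (fun p => p.1 == k)).map (·.2)

-- A's while-loop over index i, as the obvious structural recursion over the remaining characters:
-- pair lookup first (when two chars remain), else single-char lookup with fall-through.
def chiffrer2Loop (K : List (String × String)) : List Char → List String
  | [] => []
  | c1 :: c2 :: rest =>
    match pvLookup K (String.ofList [c1, c2]) with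
    | some v => v :: chiffrer2Loop K rest
    | none =>
      (match pvLookup K (String.ofList [c1]) with
       | some v => v
       | none => String.ofList [c1]) :: chiffrer2Loop K (c2 :: rest)
  | [c1] =>
    [(match pvLookup K (String.ofList [c1]) with
      | some v => v
      | none => String.ofList [c1])]

def chiffrer2 (M : String) (K : List (String × String)) : String :=
  String.join (chiffrer2Loop K M.toList)

-- ===== PORT B =====
-- the per-index decision of B's pass 1, computed from the suffix M[i:] (M[i:i+2] = first two chars of the suffix, i ≥ 0)
def pvDecide (K : List (String × String)) (suf : List Char) : String × Nat :=
  let p := suf.take 2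
  if p.length = 2 ∧ (pvLookup K (String.ofList p)).isSome then
    ((pvLookup K (String.ofList p)).getD "", 2)
  else
    match suf with
    | c :: _ => ((pvLookup K (String.ofList [c])).getD (String.ofList [c]), 1)
    | [] => ("", 1)   -- unreached: pass 1 only evaluates indices i < n

-- pass 1: the decision table over all indices 0..n-1
def pvTable (K : List (String × String)) (cs : List Char) : List (String × Nat) :=
  (List.range cs.length).map (fun i => pvDecide K (cs.drop i))

-- pass 2: pointer-jump through the table from index i; 'tbl[i]? = none' is Python's 'i < n' exit.
-- fuel only makes the recursion structural: each jump is ≥ 1, so fuel = n suffices exactly.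
def pvWalk (tbl : List (String × Nat)) : Nat → Nat → List String
  | 0, _ => []
  | fuel + 1, i =>
    match tbl[i]? with
    | none => []
    | some (piece, step) => piece :: pvWalk tbl fuel (i + step)

def chiffrer2_alt (M : String) (K : List (String × String)) : String :=
  String.join (pvWalk (pvTable K M.toList) M.toList.length 0)

-- ===== PRECONDITION & SPEC =====
def Spec_chiffrer2 (M : String) (K : List (String × String)) (out : String) : Prop := out = chiffrer2_alt M K
instance (M : String) (K : List (String × String)) (out : String) : Decidable (Spec_chiffrer2 M K out) := by unfold Spec_chiffrer2; infer_instance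

-- ===== CLAIM (what is proved, stated in full; the proofs are below) =====
def Claim_equal_chiffrer2 : Prop := ∀ (M : String) (K : List (String × String)), Dom_chiffrer2 M K → Spec_chiffrer2 M K (chiffrer2 M K)

-- ===== LEMMAS AND PROOFS =====
theorem pvTable_getElem? (K : List (String × String)) (cs : List Char) (i : Nat) :
    (pvTable K cs)[i]? = if i < cs.length then some (pvDecide K (cs.drop i)) else none := by
  simp [pvTable, List.getElem?_map]
  split_ifs <;> simp_all

theorem pvWalk_eq_loop (K : List (String × String)) (cs : List Char) :
    ∀ (fuel i : Nat), cs.length - i ≤ fuel →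
      pvWalk (pvTable K cs) fuel i = chiffrer2Loop K (cs.drop i) := by
  intro fuel
  induction fuel with
  | zero =>
    intro i h
    have : cs.length ≤ i := by omega
    simp [pvWalk, List.drop_eq_nil_of_le this, chiffrer2Loop]
  | succ fuel ih =>
    intro i h
    by_cases hi : i < cs.length
    · have hdrop : cs.drop i ≠ [] := by
        simp [List.drop_eq_nil_iff]; omega
      match hcs : cs.drop i with
      | [] => exact absurd hcs hdrop
      | [c1] =>
        have h1 : cs.drop (i + 1) = [] := by
          rw [← List.drop_drop, hcs]; rfl
        have hlen : cs.length = i + 1 := by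
          have := List.length_drop (l := cs) (i := i)
          rw [hcs] at this; simp at this; omega
        simp only [pvWalk, pvTable_getElem?, if_pos hi, hcs, pvDecide]
        simp only [List.take, List.length]
        rw [if_neg (by simp)]
        simp only [chiffrer2Loop]
        have : pvWalk (pvTable K cs) fuel (i + 1) = chiffrer2Loop K (cs.drop (i+1)) := by
          apply ih; omega
        rw [this, h1]
        simp only [chiffrer2Loop]
        cases hp : pvLookup K (String.ofList [c1]) <;> simp [hp]
      | c1 :: c2 :: rest =>
        have h1 : cs.drop (i + 1) = c2 :: rest := by
          rw [← List.drop_drop, hcs]; rfl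
        have h2 : cs.drop (i + 2) = rest := by
          rw [← List.drop_drop, hcs]; rfl
        simp only [pvWalk, pvTable_getElem?, if_pos hi, hcs, pvDecide]
        cases hp : pvLookup K (String.ofList [c1, c2]) with
        | some v =>
          rw [if_pos (by simp [List.take, hp])]
          simp only [List.take, Option.getD]
          rw [ih (i + 2) (by omega), h2]
          simp [chiffrer2Loop, hp]

        | none =>
          rw [if_neg (by simp [List.take, hp])]
          simp only
          rw [ih (i + 1) (by omega), h1]
          simp [chiffrer2Loop, hp]
          cases hq : pvLookup K (String.ofList [c1]) <;> simp
    · have : cs.drop i = [] := List.drop_eq_nil_of_le (by omega)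
      simp [pvWalk, pvTable_getElem?, hi, this, chiffrer2Loop]

-- ===== VERDICT (by name: the statement is the Claim_ definition above) =====
theorem chiffrer2_spec : Claim_equal_chiffrer2 := by
  intro M K _
  unfold Spec_chiffrer2 chiffrer2 chiffrer2_alt
  rw [pvWalk_eq_loop K M.toList M.toList.length 0 (by omega)]
  simp
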